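-- pv_equiv track=rewrite | github.com/mustafakamil12/TutorialsPoint-Python3.9 | find_delimiter.py | find_delimiter
-- ===== SOURCE A (Python) =====
-- def find_delimiter(lst):
--     """Find common delimiter for all strings in the list.
--
--     Arguments:
--     list -- list of strings to search for delimiters
--
--     Returns:
--     List of possible delimiters if there is one. Otherwise empty list.
--     """
--     delimiters = []
--     for letter in lst[0]:
--         is_possible_dilimiter = True
--         for item in lst[1:]:
--             if letter not in item:
--                 # If the letter doesn't apper in each item -- not a delimiter
--                 is_possible_dilimiter = False
--         if is_possible_dilimiter and letter not in delimiters: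
--             # If the letter appears in every string and doesn't in the list yet
--             delimiters.append(letter)
--     return delimiters
-- ===== SOURCE B (Python) =====
-- def find_delimiter(lst):
--     """Find common delimiter for all strings in the list."""
--     common = set(lst[0])
--     for s in lst[1:]:
--         common &= set(s)
--     delimiters = []
--     seen = set()
--     for ch in lst[0]:
--         if ch in common and ch not in seen:
--             delimiters.append(ch)
--             seen.add(ch)
--     return delimiters
-- ===== Notes on version B (the rewrite author's own statement) =====
-- stated objective: simpler
-- what changed: B computes the set intersection of all strings once up front and then makes a single ordered dedup pass over lst[0], instead of rescanning every string for every letter of lst[0].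
import Mathlib
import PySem

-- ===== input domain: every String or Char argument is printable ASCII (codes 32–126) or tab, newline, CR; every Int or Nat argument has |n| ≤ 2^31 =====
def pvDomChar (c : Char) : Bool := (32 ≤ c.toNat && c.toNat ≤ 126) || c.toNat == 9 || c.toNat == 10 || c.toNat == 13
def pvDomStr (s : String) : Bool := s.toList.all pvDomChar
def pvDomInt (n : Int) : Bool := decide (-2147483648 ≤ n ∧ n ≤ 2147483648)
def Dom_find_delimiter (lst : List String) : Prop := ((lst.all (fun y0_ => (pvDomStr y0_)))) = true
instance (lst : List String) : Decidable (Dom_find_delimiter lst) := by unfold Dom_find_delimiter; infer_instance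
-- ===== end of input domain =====

-- B computes the intersection of all strings once and then filters lst[0] in one dedup pass,
-- instead of rescanning every string for every letter of lst[0] (objective: simpler).

-- ===== PORT A =====
-- 'letter in item' for the single character letter is exactly character membership in item.
def find_delimiter (lst : List String) : List String :=
  (lst.headD "").toList.foldl
    (fun delimiters letter =>
      let ok := (lst.drop 1).foldl
        (fun b item => if !(item.toList.contains letter) then false else b) true
      if ok && !(delimiters.contains (String.ofList [letter])) then
        delimiters ++ [String.ofList [letter]]
      else delimiters)
    []

-- ===== PORT B =====
def find_delimiter_alt (lst : List String) : List String :=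
  let common : PySem.Set Char :=
    (lst.drop 1).foldl (fun acc s => PySem.Set.inter acc (PySem.Set.ofList s.toList))
      (PySem.Set.ofList (lst.headD "").toList)
  ((lst.headD "").toList.foldl
    (fun (p : PySem.Set Char × List String) ch =>
      if PySem.Set.contains common ch && !(PySem.Set.contains p.1 ch) then
        (PySem.Set.add p.1 ch, p.2 ++ [String.ofList [ch]])
      else p)
    ([], [])).2

-- ===== PRECONDITION & SPEC =====
-- Pre_ excludes only the empty list, on which Python A raises IndexError at lst[0].
def Pre_find_delimiter (lst : List String) : Prop := lst ≠ []
instance (lst : List String) : Decidable (Pre_find_delimiter lst) := by unfold Pre_find_delimiter; infer_instance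
def pvWitness_find_delimiter : List String := (["a,b", "x,y"])

def Spec_find_delimiter (lst : List String) (out : List String) : Prop := out = find_delimiter_alt lst
instance (lst : List String) (out : List String) : Decidable (Spec_find_delimiter lst out) := by unfold Spec_find_delimiter; infer_instance

-- ===== CLAIM (what is proved, stated in full; the proofs are below) =====
def Claim_equal_find_delimiter : Prop := ∀ (lst : List String), Dom_find_delimiter lst → Pre_find_delimiter lst → Spec_find_delimiter lst (find_delimiter lst)

-- ===== LEMMAS AND PROOFS =====

-- A's inner flag loop over the tail computes 'all strings contain the letter'.
theorem pv_flag_loop (t : List String) (c : Char) (b0 : Bool) :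
    t.foldl (fun b item => if !(item.toList.contains c) then false else b) b0
      = (b0 && t.all (fun s => s.toList.contains c)) := by
  induction t generalizing b0 with
  | nil => simp
  | cons s t ih =>
      simp only [List.foldl_cons, List.all_cons, ih]
      cases h : s.toList.contains c <;> simp_all


-- membership in B's iterated intersection
theorem pv_common_mem (t : List String) (acc : PySem.Set Char) (c : Char) :
    (c ∈ t.foldl (fun acc s => PySem.Set.inter acc (PySem.Set.ofList s.toList)) acc)
      ↔ (c ∈ acc ∧ ∀ s ∈ t, c ∈ s.toList) := by
  induction t generalizing acc with
  | nil => simp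
  | cons s t ih =>
      simp only [List.foldl_cons, ih, PySem.Set.mem_inter, PySem.Set.mem_ofList,
        List.mem_cons]
      constructor
      · rintro ⟨⟨h1, h2⟩, h3⟩
        refine ⟨h1, ?_⟩
        rintro x (rfl | hx)
        · exact h2
        · exact h3 x hx
      · rintro ⟨h1, h2⟩
        exact ⟨⟨h1, h2 s (Or.inl rfl)⟩, fun x hx => h2 x (Or.inr hx)⟩

theorem pv_ofList_single_inj (x c : Char) :
    (String.ofList [x] = String.ofList [c]) ↔ x = c := by
  constructor
  · intro h
    have h2 := congrArg String.toList h
    simp at h2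
    exact h2
  · rintro rfl; rfl

-- main loop correspondence: A's fold over the letters equals the second component of B's fold,
-- given the accumulator invariant and agreement of the per-letter conditions on the letters scanned.
theorem pv_main_loop (common : PySem.Set Char) (cond : Char → Bool)
    (L : List Char) (delims : List String) (seen : PySem.Set Char)
    (hinv : ∀ x, x ∈ seen ↔ String.ofList [x] ∈ delims)
    (hc : ∀ c ∈ L, PySem.Set.contains common c = cond c) :
    L.foldl
      (fun delimiters letter =>
        if cond letter && !(delimiters.contains (String.ofList [letter])) then
          delimiters ++ [String.ofList [letter]]
        else delimiters) delims
    = (L.foldl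
        (fun (p : PySem.Set Char × List String) ch =>
          if PySem.Set.contains common ch && !(PySem.Set.contains p.1 ch) then
            (PySem.Set.add p.1 ch, p.2 ++ [String.ofList [ch]])
          else p) (seen, delims)).2 := by
  induction L generalizing delims seen with
  | nil => simp
  | cons c L ih =>
      simp only [List.foldl_cons]
      have hcc : PySem.Set.contains common c = cond c := hc c (List.mem_cons_self ..)
      have hsc : PySem.Set.contains seen c = delims.contains (String.ofList [c]) := by
        simp only [PySem.Set.contains_eq_listContains, List.contains_eq_mem,
          decide_eq_decide]
        exact hinv c
      rw [hcc, hsc]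
      cases h : cond c && !(delims.contains (String.ofList [c]))
      · rw [if_neg (by decide), if_neg (by decide)]
        exact ih delims seen hinv (fun x hx => hc x (List.mem_cons_of_mem _ hx))
      · rw [if_pos rfl, if_pos rfl]
        apply ih
        · intro x
          simp only [PySem.Set.mem_add, List.mem_append, List.mem_singleton,
            pv_ofList_single_inj, hinv x]
        · intro x hx; exact hc x (List.mem_cons_of_mem _ hx)

-- ===== VERDICT (by name: the statement is the Claim_ definition above) =====
theorem find_delimiter_spec : Claim_equal_find_delimiter := by
  intro lst _ hpre
  unfold Spec_find_delimiter find_delimiter find_delimiter_alt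
  rcases lst with _ | ⟨h, t⟩
  · exact absurd rfl hpre
  simp only [List.headD_cons, List.drop_succ_cons, List.drop_zero]
  refine pv_main_loop _
      (fun letter => t.foldl (fun b item => if !(item.toList.contains letter) then false else b) true)
      h.toList [] [] (by simp) ?_
  intro c hcmem
  show _ = t.foldl (fun b item => if !(item.toList.contains c) then false else b) true
  rw [pv_flag_loop, Bool.true_and, Bool.eq_iff_iff]
  rw [PySem.Set.contains_iff, pv_common_mem]
  simp [hcmem, List.all_eq_true, List.contains_eq_mem, PySem.Set.mem_ofList]
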